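-- pv_equiv track=rewrite | github.com/HACK-WU/elasticsearch-toolkit-py | src/elasticflow/index_manager/tool.py | _validate_index_name
-- ===== SOURCE A (Python) =====
-- def _validate_index_name(index_name: str, allow_wildcards: bool = False) -> bool:
--     """验证索引名称是否符合 Elasticsearch 规范.
--
--     Args:
--         index_name: 索引名称
--         allow_wildcards: 是否允许通配符（用于查询场景）
--
--     Returns:
--         是否有效
--
--     Note:
--         Elasticsearch 索引名称限制：
--         - 不能以 . 或 _ 开头
--         - 不能包含 , # / \\ * ? " < > | 空格
--         - 不能是 . 或 ..
--         - 长度不能超过 255 字节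
--     """
--     if not index_name or not isinstance(index_name, str):
--         return False
--
--     # 检查长度
--     if len(index_name.encode("utf-8")) > 255:
--         return False
--
--     # 检查不能以 . 或 _ 开头
--     if index_name.startswith(".") or index_name.startswith("_"):
--         return False
--
--     # 检查是否为 . 或 ..
--     if index_name in (".", ".."):
--         return False
--
--     # 定义无效字符（基础集合，不含通配符）
--     invalid_chars = {",", "#", "/", "\\", '"', "<", ">", "|", " ", "\t", "\n", "\r"}
--
--     # 如果不允许通配符，将通配符也加入无效字符集
--     if not allow_wildcards:
--         invalid_chars.update({"*", "?"})
--
--     if any(char in invalid_chars for char in index_name):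
--         return False
--
--     return True
-- ===== SOURCE B (Python) =====
-- # B: one compiled whitelist regex per mode; fullmatch replaces the empty-name,
-- # prefix, dot-name and forbidden-character checks in a single automaton pass.
-- import re
--
-- _PATTERNS = {
--     # first char: not . _ nor any forbidden char; rest: not any forbidden char
--     True: re.compile(r'[^._,#/\\"<>| \t\n\r][^,#/\\"<>| \t\n\r]*'),
--     False: re.compile(r'[^._,#/\\"<>| \t\n\r*?][^,#/\\"<>| \t\n\r*?]*'),
-- }
--
--
-- def _validate_index_name(index_name: str, allow_wildcards: bool = False) -> bool:
--     if not isinstance(index_name, str):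
--         return False
--     if len(index_name.encode("utf-8")) > 255:
--         return False
--     return _PATTERNS[bool(allow_wildcards)].fullmatch(index_name) is not None
-- ===== Notes on version B (the rewrite author's own statement) =====
-- stated objective: idiomatic
-- what changed: B keeps only the type and utf-8 byte-length guards and replaces A's four remaining checks (empty name, '.'/'_' prefix, '.'/'..' names, per-character forbidden-set scan) with one compiled whitelist regular expression per wildcard mode, decided by a single fullmatch automaton pass.
import Mathlib
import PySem

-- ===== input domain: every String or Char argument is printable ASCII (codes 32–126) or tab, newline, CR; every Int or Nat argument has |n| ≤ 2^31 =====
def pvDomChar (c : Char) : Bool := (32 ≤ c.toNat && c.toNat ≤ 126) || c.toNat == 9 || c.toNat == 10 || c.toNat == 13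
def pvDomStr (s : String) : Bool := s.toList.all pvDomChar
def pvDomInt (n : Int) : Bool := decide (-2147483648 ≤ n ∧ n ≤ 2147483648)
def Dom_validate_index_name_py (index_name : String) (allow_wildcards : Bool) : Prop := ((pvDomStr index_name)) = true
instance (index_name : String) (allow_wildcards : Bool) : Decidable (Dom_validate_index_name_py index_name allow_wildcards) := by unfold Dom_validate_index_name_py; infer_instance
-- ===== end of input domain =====

-- B replaces A's empty/prefix/dot-name/forbidden-character checks by one whitelist
-- regex fullmatch per wildcard mode (objective: idiomatic); return values agree on all of Dom.

-- ===== PORT A =====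
-- len(index_name.encode("utf-8")) ported as the character count: exact on the ASCII domain Dom.
def validate_index_name_py (index_name : String) (allow_wildcards : Bool) : Bool :=
  if index_name.toList.length = 0 then false
  else if 255 < index_name.toList.length then false
  else if PySem.Str.startswith index_name "." || PySem.Str.startswith index_name "_" then false
  else if index_name == "." || index_name == ".." then false
  else
    let invalid : PySem.Set Char :=
      PySem.Set.ofList [',', '#', '/', '\\', '"', '<', '>', '|', ' ', '\t', '\n', '\r']
    let invalid : PySem.Set Char :=
      if !allow_wildcards then PySem.Set.update invalid ['*', '?'] else invalid
    if index_name.toList.any (fun c => PySem.Set.contains invalid c) then false else true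

-- ===== PORT B =====
-- The negated character class of the tail position of the regex, per wildcard mode.
def pvClassRest (allow_wildcards : Bool) : List Char :=
  if allow_wildcards then [',', '#', '/', '\\', '"', '<', '>', '|', ' ', '\t', '\n', '\r']
  else [',', '#', '/', '\\', '"', '<', '>', '|', ' ', '\t', '\n', '\r', '*', '?']

-- re.fullmatch of the fixed pattern [^._<rest>][^<rest>]* ported by hand as its exact
-- match semantics: nonempty, head outside the first class, every tail char outside the rest class.
def pvFullmatch (cs : List Char) (allow_wildcards : Bool) : Bool :=
  match cs with
  | [] => false
  | c :: t =>
      !(('.' :: '_' :: pvClassRest allow_wildcards).contains c) &&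
        t.all (fun x => !((pvClassRest allow_wildcards).contains x))

-- len(index_name.encode("utf-8")) ported as the character count: exact on the ASCII domain Dom.
def validate_index_name_py_alt (index_name : String) (allow_wildcards : Bool) : Bool :=
  if 255 < index_name.toList.length then false
  else pvFullmatch index_name.toList allow_wildcards

-- ===== PRECONDITION & SPEC =====
def Spec_validate_index_name_py (index_name : String) (allow_wildcards : Bool) (out : Bool) : Prop := out = validate_index_name_py_alt index_name allow_wildcards
instance (index_name : String) (allow_wildcards : Bool) (out : Bool) : Decidable (Spec_validate_index_name_py index_name allow_wildcards out) := by unfold Spec_validate_index_name_py; infer_instance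

-- ===== CLAIM (what is proved, stated in full; the proofs are below) =====
def Claim_equal_validate_index_name_py : Prop := ∀ (index_name : String) (allow_wildcards : Bool), Dom_validate_index_name_py index_name allow_wildcards → Spec_validate_index_name_py index_name allow_wildcards (validate_index_name_py index_name allow_wildcards)

-- ===== LEMMAS AND PROOFS =====

theorem pv_prefix_singleton (a c : Char) (t : List Char) : ([a] <+: c :: t) ↔ c = a := by
  constructor
  · intro h; rcases h with ⟨u, hu⟩; simp at hu; exact hu.1.symm
  · intro h; subst h; exact ⟨t, rfl⟩

theorem pv_startswith_single (s p : String) (a c : Char) (t : List Char)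
    (hl : s.toList = c :: t) (hp : p.toList = [a]) :
    PySem.Str.startswith s p = (c == a) := by
  rw [Bool.eq_iff_iff]
  simp only [PySem.Str.startswith, hl, hp, beq_iff_eq]
  rw [PySem.Chars.startswith_iff]
  exact pv_prefix_singleton a c t

theorem pv_ne_dot {s : String} {c : Char} {t : List Char} (hl : s.toList = c :: t)
    (hc : ¬ c = '.') : (s == "." || s == "..") = false := by
  have h1 : s ≠ "." := by intro h; subst h; simp at hl; exact hc hl.1.symm
  have h2 : s ≠ ".." := by intro h; subst h; simp at hl; exact hc hl.1.symm
  simp [h1, h2]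

theorem pv_set_eval (w : Bool) :
    (if !w then
        PySem.Set.update
          (PySem.Set.ofList [',', '#', '/', '\\', '"', '<', '>', '|', ' ', '\t', '\n', '\r'])
          ['*', '?']
      else PySem.Set.ofList [',', '#', '/', '\\', '"', '<', '>', '|', ' ', '\t', '\n', '\r'])
      = pvClassRest w := by
  cases w <;> decide

theorem pv_contains_eq (L : List Char) (x : Char) :
    PySem.Set.contains L x = L.contains x := by
  induction L with
  | nil => rfl
  | cons a t ih => simp [PySem.Set.contains] at *

theorem pv_main (s : String) (w : Bool) :
    validate_index_name_py s w = validate_index_name_py_alt s w := by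
  unfold validate_index_name_py validate_index_name_py_alt
  cases hl : s.toList with
  | nil => simp [pvFullmatch]
  | cons c t =>
    rw [pv_startswith_single s "." '.' c t hl rfl,
        pv_startswith_single s "_" '_' c t hl rfl]
    have hz : ¬ (c :: t).length = 0 := by simp
    rw [if_neg hz]
    by_cases hlen : 255 < (c :: t).length
    · rw [if_pos hlen, if_pos hlen]
    · rw [if_neg hlen, if_neg hlen]
      simp only [pvFullmatch, pv_set_eval w]
      by_cases hd : c = '.'
      · simp [hd, pvClassRest]
      · by_cases hu : c = '_'
        · simp [hu, pvClassRest]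
        · have hg : (c == '.' || c == '_') = false := by simp [hd, hu]
          rw [hg, if_neg (by simp : ¬ (false = true)), pv_ne_dot hl hd,
              if_neg (by simp : ¬ (false = true))]
          have h1 : (c == '.') = false := by simp [hd]
          have h2 : (c == '_') = false := by simp [hu]
          simp only [List.any_cons, pv_contains_eq, List.contains_cons, h1, h2, Bool.false_or,
            List.all_eq_not_any_not, Bool.not_not]
          cases hc1 : (pvClassRest w).contains c <;>
            cases ht : t.any (fun x => (pvClassRest w).contains x) <;> simp
  
-- ===== VERDICT (by name: the statement is the Claim_ definition above) =====
theorem validate_index_name_py_spec : Claim_equal_validate_index_name_py := by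
  intro s w _
  unfold Spec_validate_index_name_py
  exact pv_main s w
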